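-- pv_equiv track=rewrite | github.com/Mihnea1711/ML | Lab12/p12.py | transform_ratings
-- ===== SOURCE A (Python) =====
-- def transform_ratings(ratings):
--     product_ratings = {}
--     for user, items in ratings.items():
--         for item, rating in items.items():
--             if item not in product_ratings:
--                 product_ratings[item] = {}
--             product_ratings[item][user] = rating
--     return product_ratings
-- ===== SOURCE B (Python) =====
-- def transform_ratings(ratings):
--     # Phase 1: collect all item keys, in first-seen order.
--     all_items = []
--     seen = set()
--     for items in ratings.values():
--         for item in items:
--             if item not in seen:
--                 seen.add(item)
--                 all_items.append(item)
--     # Phase 2: build the result item-centric, scanning the users per item.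
--     return {item: {user: items[item]
--                    for user, items in ratings.items() if item in items}
--             for item in all_items}
-- ===== Notes on version B (the rewrite author's own statement) =====
-- stated objective: alternative
-- what changed: B first collects the item index in first-seen order, then builds the result item-outer by scanning every user per item, instead of A's user-outer double loop that accumulates into a dict of dicts. Pre_ only excludes association lists with duplicate keys, which do not encode any Python dict.
import Mathlib
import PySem

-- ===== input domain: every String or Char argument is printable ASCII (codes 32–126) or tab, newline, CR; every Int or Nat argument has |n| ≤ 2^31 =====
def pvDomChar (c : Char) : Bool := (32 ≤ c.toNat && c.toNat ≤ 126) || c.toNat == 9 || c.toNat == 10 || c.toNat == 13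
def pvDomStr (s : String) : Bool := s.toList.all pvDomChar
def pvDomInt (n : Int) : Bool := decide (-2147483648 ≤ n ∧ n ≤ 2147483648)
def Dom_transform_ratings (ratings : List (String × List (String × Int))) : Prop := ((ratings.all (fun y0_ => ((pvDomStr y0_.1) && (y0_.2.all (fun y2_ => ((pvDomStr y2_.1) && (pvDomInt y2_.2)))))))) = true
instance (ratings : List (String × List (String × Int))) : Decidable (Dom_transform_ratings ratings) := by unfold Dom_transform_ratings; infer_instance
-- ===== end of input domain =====

-- B builds the item index first and then scans users per item (item-outer two-phase),
-- instead of A's user-outer accumulation; alternative decomposition, not claimed faster.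

-- ===== PORT A =====
-- product_ratings is a Python dict of dicts: PySem.Dict; the input association
-- lists are iterated directly (ratings.items() / items.items()).
def transform_ratings (ratings : List (String × List (String × Int))) : List (String × List (String × Int)) :=
  let product_ratings : PySem.Dict String (PySem.Dict String Int) :=
    ratings.foldl (fun pr p =>
      p.2.foldl (fun pr q =>
        -- if item not in product_ratings: product_ratings[item] = {}
        let pr := if pr.contains q.1 then pr else pr.insert q.1 PySem.Dict.empty
        -- product_ratings[item][user] = rating
        pr.modify q.1 PySem.Dict.empty (fun inner => inner.insert p.1 q.2)) pr)
      PySem.Dict.empty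
  product_ratings.items.map (fun e => (e.1, e.2.items))

-- ===== PORT B =====
-- Phase 1 of Source B: the item index (all_items, in first-seen order) with its 'seen' set.
def pvCollectItems (ratings : List (String × List (String × Int))) : List String :=
  (ratings.foldl (fun st p =>
      p.2.foldl (fun (st : List String × PySem.Set String) q =>
        if st.2.contains q.1 then st
        else (st.1 ++ [q.1], st.2.add q.1)) st)
    ([], ([] : PySem.Set String))).1

-- Phase 2 of Source B: the item-outer dict comprehension ('if item in items' then 'items[item]').
def transform_ratings_alt (ratings : List (String × List (String × Int))) : List (String × List (String × Int)) :=
  (pvCollectItems ratings).map (fun item =>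
    (item, ratings.filterMap (fun p =>
      ((PySem.Dict.mk p.2).get? item).map (fun r => (p.1, r)))))

-- ===== PRECONDITION & SPEC =====
-- Pre_ excludes association lists with duplicate user keys or duplicate item keys inside a
-- user's list: those do not encode any Python dict (a Python dict literal collapses them
-- before the call), and on them the two list-level ports legitimately disagree.
def Pre_transform_ratings (ratings : List (String × List (String × Int))) : Prop :=
  (ratings.map Prod.fst).Nodup ∧ ∀ p ∈ ratings, (p.2.map Prod.fst).Nodup
instance (ratings : List (String × List (String × Int))) : Decidable (Pre_transform_ratings ratings) := by unfold Pre_transform_ratings; infer_instance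

def pvWitness_transform_ratings : (List (String × List (String × Int))) :=
  [("alice", [("a", 5), ("b", 3)]), ("bob", [("b", 1)])]

def Spec_transform_ratings (ratings : List (String × List (String × Int))) (out : List (String × List (String × Int))) : Prop := out = transform_ratings_alt ratings
instance (ratings : List (String × List (String × Int))) (out : List (String × List (String × Int))) : Decidable (Spec_transform_ratings ratings out) := by unfold Spec_transform_ratings; infer_instance

-- ===== CLAIM (what is proved, stated in full; the proofs are below) =====
def Claim_equal_transform_ratings : Prop := ∀ (ratings : List (String × List (String × Int))), Dom_transform_ratings ratings → Pre_transform_ratings ratings → Spec_transform_ratings ratings (transform_ratings ratings)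

-- ===== LEMMAS AND PROOFS =====

-- The per-rating update of A, in normal form.
theorem pvStepA_eq (u : String) (pr : PySem.Dict String (PySem.Dict String Int)) (q : String × Int) :
    ((if pr.contains q.1 then pr else pr.insert q.1 PySem.Dict.empty).modify q.1
      PySem.Dict.empty (fun inner => inner.insert u q.2))
    = pr.insert q.1 ((pr.getD q.1 PySem.Dict.empty).insert u q.2) := by
  by_cases h : pr.contains q.1 = true
  · simp [h, PySem.Dict.modify]
  · simp only [h]
    rw [if_neg (by simp)]
    show (pr.insert q.1 PySem.Dict.empty).insert q.1
        (((pr.insert q.1 PySem.Dict.empty).getD q.1 PySem.Dict.empty).insert u q.2) = _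
    rw [PySem.Dict.getD_insert_self, PySem.Dict.insert_insert_self]
    rw [PySem.Dict.getD_of_not_contains (h := by simpa using h)]

-- A's accumulator in normal form (pvStepA_eq applied inside both folds).
def pvAState (ratings : List (String × List (String × Int))) : PySem.Dict String (PySem.Dict String Int) :=
  ratings.foldl (fun pr p =>
    p.2.foldl (fun pr q => pr.insert q.1 ((pr.getD q.1 PySem.Dict.empty).insert p.1 q.2)) pr)
    PySem.Dict.empty

theorem pvA_eq_AState (ratings : List (String × List (String × Int))) :
    transform_ratings ratings = (pvAState ratings).items.map (fun e => (e.1, e.2.items)) := by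
  have hfun : (fun (pr : PySem.Dict String (PySem.Dict String Int))
      (p : String × List (String × Int)) =>
        p.2.foldl (fun pr q =>
          let pr := if pr.contains q.1 then pr else pr.insert q.1 PySem.Dict.empty
          pr.modify q.1 PySem.Dict.empty (fun inner => inner.insert p.1 q.2)) pr)
      = (fun pr p =>
        p.2.foldl (fun pr q => pr.insert q.1 ((pr.getD q.1 PySem.Dict.empty).insert p.1 q.2)) pr) := by
    funext pr p
    exact PySem.List.foldl_congr_mem p.2 _ _ pr (fun acc q _ => pvStepA_eq p.1 acc q)
  show (ratings.foldl (fun (pr : PySem.Dict String (PySem.Dict String Int)) p =>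
        p.2.foldl (fun pr q =>
          let pr := if pr.contains q.1 then pr else pr.insert q.1 PySem.Dict.empty
          pr.modify q.1 PySem.Dict.empty (fun inner => inner.insert p.1 q.2)) pr)
      PySem.Dict.empty).items.map (fun e => (e.1, e.2.items)) = _
  rw [hfun]
  rfl

-- B's per-item value.
def pvInner (ratings : List (String × List (String × Int))) (item : String) : List (String × Int) :=
  ratings.filterMap (fun p => ((PySem.Dict.mk p.2).get? item).map (fun r => (p.1, r)))

theorem pvAlt_eq (ratings : List (String × List (String × Int))) :
    transform_ratings_alt ratings
      = (pvCollectItems ratings).map (fun item => (item, pvInner ratings item)) := rfl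

-- the item index without the redundant 'seen' component (proof form)
def pvCollectL (ratings : List (String × List (String × Int))) : List String :=
  ratings.foldl (fun acc p =>
    p.2.foldl (fun acc q => if acc.contains q.1 then acc else acc ++ [q.1]) acc) []

theorem pvCollectInner_pair (l : List (String × Int)) :
    ∀ (a : List String),
      l.foldl (fun (st : List String × PySem.Set String) q =>
          if st.2.contains q.1 then st else (st.1 ++ [q.1], st.2.add q.1)) (a, a)
      = (l.foldl (fun acc q => if acc.contains q.1 then acc else acc ++ [q.1]) a,
         l.foldl (fun acc q => if acc.contains q.1 then acc else acc ++ [q.1]) a) := by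
  induction l with
  | nil => intro a; rfl
  | cons q rest ih =>
    intro a
    by_cases h : q.1 ∈ a
    · simpa [List.foldl_cons, h] using ih a
    · simpa [List.foldl_cons, h, PySem.Set.add_of_not_mem h] using ih (a ++ [q.1])

theorem pvCollect_eq (ratings : List (String × List (String × Int))) :
    pvCollectItems ratings = pvCollectL ratings := by
  unfold pvCollectItems pvCollectL
  have : ∀ (rs : List (String × List (String × Int))) (a : List String),
      rs.foldl (fun st p =>
        p.2.foldl (fun (st : List String × PySem.Set String) q =>
          if st.2.contains q.1 then st else (st.1 ++ [q.1], st.2.add q.1)) st) (a, a)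
      = (rs.foldl (fun acc p =>
          p.2.foldl (fun acc q => if acc.contains q.1 then acc else acc ++ [q.1]) acc) a,
         rs.foldl (fun acc p =>
          p.2.foldl (fun acc q => if acc.contains q.1 then acc else acc ++ [q.1]) acc) a) := by
    intro rs
    induction rs with
    | nil => intro a; rfl
    | cons p rest ih =>
      intro a
      simp only [List.foldl_cons]
      rw [pvCollectInner_pair p.2 a]
      exact ih _
  rw [this ratings []]

theorem pvGetMkNone (l : List (String × Int)) (x : String) (h : x ∉ l.map Prod.fst) :
    (PySem.Dict.mk l).get? x = none := by
  rw [PySem.Dict.get?_eq_none_iff_not_mem_keys]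
  simpa using h

theorem pvGetMkMem (l : List (String × Int)) (q : String × Int) (hnd : (l.map Prod.fst).Nodup)
    (h : q ∈ l) : (PySem.Dict.mk l).get? q.1 = some q.2 := by
  have hm : (q.1, q.2) ∈ (PySem.Dict.mk l).items := by simpa using h
  exact PySem.Dict.get?_of_mem_items (PySem.Dict.mk l) hm (by simpa using hnd)

-- the item-index step of Source B is Set.add
theorem pvAdd_step (acc : List String) (x : String) :
    (if acc.contains x then acc else acc ++ [x]) = PySem.Set.add acc x := by
  rw [PySem.Set.add_eq_ite]
  by_cases h : x ∈ acc <;> simp [h]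

theorem pvCollect_append (rs : List (String × List (String × Int)))
    (p : String × List (String × Int)) :
    pvCollectItems (rs ++ [p]) = PySem.Set.update (pvCollectItems rs) (p.2.map Prod.fst) := by
  rw [pvCollect_eq, pvCollect_eq]
  unfold pvCollectL
  rw [List.foldl_append]
  rw [PySem.Set.update_map_eq_foldl_add]
  exact PySem.List.foldl_congr_mem p.2 _ _ (pvCollectL rs) (fun acc q _ => pvAdd_step acc q.1)

theorem pvCollect_nodup (rs : List (String × List (String × Int))) :
    (pvCollectItems rs).Nodup := by
  induction rs using List.reverseRecOn with
  | nil => simp [pvCollectItems]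
  | append_singleton rs p ih => rw [pvCollect_append]; exact PySem.Set.nodup_update _ _ ih

theorem pvCollect_mem (rs : List (String × List (String × Int))) (x : String) :
    x ∈ pvCollectItems rs ↔ ∃ p ∈ rs, x ∈ p.2.map Prod.fst := by
  induction rs using List.reverseRecOn with
  | nil => simp [pvCollectItems]
  | append_singleton rs p ih =>
    rw [pvCollect_append, PySem.Set.mem_update, ih]
    constructor
    · rintro (⟨p', hp', hx⟩ | hx)
      · exact ⟨p', by simp [hp'], hx⟩
      · exact ⟨p, by simp, hx⟩
    · rintro ⟨p', hp', hx⟩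
      rcases List.mem_append.1 hp' with h | h
      · exact Or.inl ⟨p', h, hx⟩
      · simp only [List.mem_singleton] at h; subst h; exact Or.inr hx

theorem pvInner_append (rs : List (String × List (String × Int)))
    (p : String × List (String × Int)) (item : String) :
    pvInner (rs ++ [p]) item
      = pvInner rs item ++ (((PySem.Dict.mk p.2).get? item).map (fun r => (p.1, r))).toList := by
  cases h : (PySem.Dict.mk p.2).get? item <;>
    simp [pvInner, List.filterMap_append, h]

theorem pvInner_nil (rs : List (String × List (String × Int))) (item : String)
    (h : item ∉ pvCollectItems rs) : pvInner rs item = [] := by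
  rw [pvInner, List.filterMap_eq_nil_iff]
  intro p hp
  have : item ∉ p.2.map Prod.fst := fun hm => h ((pvCollect_mem rs item).2 ⟨p, hp, hm⟩)
  simp [pvGetMkNone p.2 item this]

theorem pvInner_users (rs : List (String × List (String × Int))) (item : String)
    (q : String × Int) (h : q ∈ pvInner rs item) : q.1 ∈ rs.map Prod.fst := by
  rw [pvInner, List.mem_filterMap] at h
  rcases h with ⟨p, hp, he⟩
  cases hg : (PySem.Dict.mk p.2).get? item with
  | none => rw [hg] at he; simp at he
  | some r =>
    rw [hg] at he
    simp only [Option.map_some, Option.some.injEq] at he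
    exact List.mem_map.2 ⟨p, hp, by rw [← he]⟩

-- what one user's ratings do to an existing entry
def pvAddRat (u : String) (its : List (String × Int)) (e : String × PySem.Dict String Int) :
    String × PySem.Dict String Int :=
  match (PySem.Dict.mk its).get? e.1 with
  | some r => (e.1, e.2.insert u r)
  | none => e

theorem pvAddRat_skip (u : String) (its : List (String × Int))
    (e : String × PySem.Dict String Int) (h : e.1 ∉ its.map Prod.fst) :
    pvAddRat u its e = e := by
  simp [pvAddRat, pvGetMkNone its e.1 h]

-- MAIN LOOP LEMMA: A's inner loop over one user's ratings, on any accumulator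
theorem pvLoopA (u : String) :
    ∀ (its : List (String × Int)) (pr : PySem.Dict String (PySem.Dict String Int)),
    (its.map Prod.fst).Nodup → pr.keys.Nodup →
    (∀ e ∈ pr.items, e.1 ∈ its.map Prod.fst → e.2.contains u = false) →
    its.foldl (fun pr q => pr.insert q.1 ((pr.getD q.1 PySem.Dict.empty).insert u q.2)) pr
    = PySem.Dict.mk (pr.items.map (pvAddRat u its)
        ++ (its.filter (fun q => !(pr.contains q.1))).map
            (fun q => (q.1, PySem.Dict.mk [(u, q.2)]))) := by
  intro its
  induction its with
  | nil =>
    intro pr _ _ _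
    simp only [List.foldl_nil, List.filter_nil, List.map_nil, List.append_nil]
    rw [show pvAddRat u [] = id from funext fun e => pvAddRat_skip u [] e (by simp),
      List.map_id]
  | cons q rest ih =>
    intro pr hnd hk hH
    rw [List.map_cons] at hnd
    have hq1rest : q.1 ∉ rest.map Prod.fst := (List.nodup_cons.1 hnd).1
    have hndrest : (rest.map Prod.fst).Nodup := (List.nodup_cons.1 hnd).2
    rw [List.foldl_cons]
    set v := (pr.getD q.1 PySem.Dict.empty).insert u q.2 with hv
    set pr' := pr.insert q.1 v with hpr'
    have hk' : pr'.keys.Nodup := PySem.Dict.nodup_keys_insert pr q.1 v hk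
    have hH' : ∀ e ∈ pr'.items, e.1 ∈ rest.map Prod.fst → e.2.contains u = false := by
      intro e he hmem
      rcases (PySem.Dict.mem_items_insert pr q.1 v e).1 he with he' | ⟨he', hne⟩
      · exfalso; rw [he'] at hmem; exact hq1rest hmem
      · exact hH e he' (by simp [hmem])
    rw [ih pr' hndrest hk' hH']
    congr 1
    by_cases hc : pr.contains q.1 = true
    · -- existing key: entry overwritten in place
      have hfilter : (q :: rest).filter (fun q' => !(pr.contains q'.1))
          = rest.filter (fun q' => !(pr.contains q'.1)) := by
        simp [hc]
      have hcont' : ∀ q' ∈ rest, (!(pr'.contains q'.1)) = (!(pr.contains q'.1)) := by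
        intro q' hq'
        have hne : (q'.1 == q.1) = false := by
          simp only [beq_eq_false_iff_ne, ne_eq]
          intro h; exact hq1rest (h ▸ List.mem_map.2 ⟨q', hq', rfl⟩)
        rw [hpr', PySem.Dict.contains_insert, hne, Bool.false_or]
      rw [hfilter, List.filter_congr hcont']
      congr 1
      -- map part
      rw [hpr', PySem.Dict.items_insert_of_contains pr v hc, List.map_map]
      apply List.map_congr_left
      intro e he
      by_cases heq : e.1 = q.1
      · have hm : (q.1, e.2) ∈ pr.items := by
          rw [← heq, Prod.mk.eta]; exact he
        have hgetD : pr.getD q.1 PySem.Dict.empty = e.2 :=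
          PySem.Dict.getD_of_mem_items pr hm hk PySem.Dict.empty
        have h1 : pvAddRat u (q :: rest) e = (e.1, e.2.insert u q.2) := by
          unfold pvAddRat
          rw [show (PySem.Dict.mk (q :: rest)).get? e.1 = some q.2 by
            rw [PySem.Dict.get?_mk_cons]; simp [heq]]
        show pvAddRat u rest (if (e.1 == q.1) = true then (q.1, v) else e)
            = pvAddRat u (q :: rest) e
        rw [if_pos (by simpa using heq), h1,
          pvAddRat_skip u rest (q.1, v) (by simpa using hq1rest), hv, hgetD, heq]
      · have hbeq : (e.1 == q.1) = false := by simpa using heq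
        have h1 : pvAddRat u (q :: rest) e = pvAddRat u rest e := by
          unfold pvAddRat
          rw [PySem.Dict.get?_mk_cons]
          simp [show (q.1 == e.1) = false by simpa using (Ne.symm heq)]
        simp [heq, h1]
    · -- fresh key: entry appended at the end
      have hc' : pr.contains q.1 = false := by simpa using hc
      have hq1pr : q.1 ∉ pr.keys := by
        intro h
        have := (PySem.Dict.contains_iff_mem_keys pr q.1).2 h
        simp [this] at hc'
      have hvmk : v = PySem.Dict.mk [(u, q.2)] := by
        rw [hv, PySem.Dict.getD_of_not_contains pr PySem.Dict.empty hc']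
        apply PySem.Dict.ext
        rw [PySem.Dict.items_insert_of_not_contains PySem.Dict.empty _ (PySem.Dict.contains_empty u)]
        simp [PySem.Dict.empty]
      have hitems : pr'.items = pr.items ++ [(q.1, v)] :=
        PySem.Dict.items_insert_of_not_contains pr v hc'
      have hfilter : (q :: rest).filter (fun q' => !(pr.contains q'.1))
          = q :: rest.filter (fun q' => !(pr.contains q'.1)) := by
        simp [hc']
      have hcont' : ∀ q' ∈ rest, (!(pr'.contains q'.1)) = (!(pr.contains q'.1)) := by
        intro q' hq'
        have hne : (q'.1 == q.1) = false := by
          simp only [beq_eq_false_iff_ne, ne_eq]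
          intro h; exact hq1rest (h ▸ List.mem_map.2 ⟨q', hq', rfl⟩)
        rw [hpr', PySem.Dict.contains_insert, hne, Bool.false_or]
      rw [hitems, hfilter, List.filter_congr hcont', List.map_append]
      have hmapnew : [(q.1, v)].map (pvAddRat u rest) = [(q.1, v)] := by
        simp only [List.map_cons, List.map_nil]
        rw [pvAddRat_skip u rest (q.1, v) (by simpa using hq1rest)]
      have hmapold : pr.items.map (pvAddRat u rest) = pr.items.map (pvAddRat u (q :: rest)) := by
        apply List.map_congr_left
        intro e he
        have hne : e.1 ≠ q.1 := by
          intro h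
          exact hq1pr (h ▸ (PySem.Dict.mem_keys_of_mem_items (d := pr) he))
        have h1 : pvAddRat u (q :: rest) e = pvAddRat u rest e := by
          unfold pvAddRat
          rw [PySem.Dict.get?_mk_cons]
          simp [show (q.1 == e.1) = false by simpa using (Ne.symm hne)]
        rw [h1]
      rw [hmapnew, hmapold, List.map_cons, hvmk]
      simp [List.append_assoc]

-- MAIN INVARIANT: A's accumulator is exactly B's table
theorem pvMain (rs : List (String × List (String × Int))) (hpre : Pre_transform_ratings rs) :
    pvAState rs
      = PySem.Dict.mk ((pvCollectItems rs).map
          (fun item => (item, PySem.Dict.mk (pvInner rs item)))) := by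
  induction rs using List.reverseRecOn with
  | nil => rfl
  | append_singleton rs p ih =>
    obtain ⟨houter, hinner⟩ := hpre
    have hpre' : Pre_transform_ratings rs :=
      ⟨by simpa using (List.nodup_append.1 (by simpa using houter)).1,
       fun p' hp' => hinner p' (List.mem_append.2 (Or.inl hp'))⟩
    have hufresh : p.1 ∉ rs.map Prod.fst := by
      have hsplit := List.nodup_append.1 (by simpa [List.map_append] using houter)
      intro h
      exact hsplit.2.2 p.1 h p.1 (by simp) rfl
    have hndits : (p.2.map Prod.fst).Nodup := hinner p (by simp)
    have ihh := ih hpre'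
    unfold pvAState
    rw [List.foldl_append]
    rw [show rs.foldl (fun pr p =>
        p.2.foldl (fun pr q => pr.insert q.1 ((pr.getD q.1 PySem.Dict.empty).insert p.1 q.2)) pr)
        PySem.Dict.empty = pvAState rs from rfl, ihh]
    set B := PySem.Dict.mk ((pvCollectItems rs).map
        (fun item => (item, PySem.Dict.mk (pvInner rs item)))) with hB
    simp only [List.foldl_cons, List.foldl_nil]
    have hkB : B.keys.Nodup := by
      rw [hB]
      simp only [PySem.Dict.keys_mk, List.map_map]
      rw [show ((fun (x : String × PySem.Dict String Int) => x.1) ∘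
        fun item => (item, PySem.Dict.mk (pvInner rs item))) = id from rfl, List.map_id]
      exact pvCollect_nodup rs
    have hHB : ∀ e ∈ B.items, e.1 ∈ p.2.map Prod.fst → e.2.contains p.1 = false := by
      intro e he _
      rw [hB] at he
      rcases List.mem_map.1 he with ⟨item, hit, hee⟩
      cases hcb : e.2.contains p.1
      · rfl
      · exfalso
        rw [PySem.Dict.contains_iff_mem_keys] at hcb
        rw [← hee] at hcb
        simp only [PySem.Dict.keys_mk] at hcb
        rcases List.mem_map.1 hcb with ⟨q, hq, hq1⟩
        exact hufresh (hq1 ▸ pvInner_users rs item q hq)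
    rw [pvLoopA p.1 p.2 B hndits hkB hHB]
    congr 1
    -- now compare the two item lists
    rw [pvCollect_append, PySem.Set.update_eq_append_filter,
      PySem.Set.ofList_eq_self_of_nodup _ hndits, List.map_append]
    congr 1
    · -- old items: entry extended by p's rating if present
      rw [hB]
      simp only [List.map_map]
      apply List.map_congr_left
      intro item hit
      simp only [Function.comp_apply]
      rw [pvInner_append rs p item]
      unfold pvAddRat
      cases hg : (PySem.Dict.mk p.2).get? item with
      | none => simp
      | some r =>
        simp only [Option.map_some, Option.toList_some]
        have hfresh : (PySem.Dict.mk (pvInner rs item)).contains p.1 = false := by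
          cases hcb : (PySem.Dict.mk (pvInner rs item)).contains p.1
          · rfl
          · exfalso
            rw [PySem.Dict.contains_iff_mem_keys] at hcb
            simp only [PySem.Dict.keys_mk] at hcb
            rcases List.mem_map.1 hcb with ⟨q, hq, hq1⟩
            exact hufresh (hq1 ▸ pvInner_users rs item q hq)
        have hins : (PySem.Dict.mk (pvInner rs item)).insert p.1 r
            = PySem.Dict.mk (pvInner rs item ++ [(p.1, r)]) := by
          apply PySem.Dict.ext
          rw [PySem.Dict.items_insert_of_not_contains _ _ hfresh]
        rw [hins]
    · -- new items: they had no raters in rs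
      have hcontB : ∀ q ∈ p.2, (!(B.contains q.1)) = !(List.contains (pvCollectItems rs) q.1) := by
        intro q _
        rw [hB]
        congr 1
        rw [PySem.Dict.contains_eq_decide_mem_keys]
        simp [List.map_map, Function.comp]
      rw [List.filter_congr hcontB]
      simp only [PySem.Set.contains_eq_listContains]
      have hfm : (p.2.map Prod.fst).filter (fun x => !(List.contains (pvCollectItems rs) x))
          = (p.2.filter (fun q => !(List.contains (pvCollectItems rs) q.1))).map Prod.fst := by
        rw [List.filter_map]; rfl
      rw [hfm, List.map_map]
      apply List.map_congr_left
      intro q hq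
      simp only [Function.comp_apply]
      have hqmem : q ∈ p.2 := (List.mem_filter.1 hq).1
      have hqnot : q.1 ∉ pvCollectItems rs := by
        have := (List.mem_filter.1 hq).2
        simpa [List.contains_iff_mem] using this
      rw [pvInner_append rs p q.1, pvInner_nil rs q.1 hqnot,
        pvGetMkMem p.2 q hndits hqmem]
      rfl

-- ===== VERDICT (by name: the statement is the Claim_ definition above) =====
theorem transform_ratings_spec : Claim_equal_transform_ratings := by
  intro rs _ hpre
  unfold Spec_transform_ratings
  rw [pvA_eq_AState, pvAlt_eq, pvMain rs hpre]
  simp only [List.map_map]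
  apply List.map_congr_left
  intro item _
  rfl
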